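-- pv_equiv track=rewrite | github.com/TianboJi/Dialogue-Eval | mturk_statistics.py | model_mapping
-- ===== SOURCE A (Python) =====
-- def model_mapping(modelnames):
--     models = []
--     model_prefixes = {}
--     for e in modelnames:
--         if e.endswith("_p"):
--             model_prefix = e[:-2]
--         else:
--             model_prefix = e
--         if model_prefix not in models:
--             models.append(model_prefix)
--         model_prefixes[e] = model_prefix
--     mappings = {
--         e: chr(ord("A") + i)
--         for i, e in enumerate(models)
--     }
--     model_mappings = {
--         k: k.replace(v, mappings[v])
--         for k, v in model_prefixes.items()
--     }
--     model_mappings = {k: v.replace('_p', r"$_p$") for k, v in model_mappings.items()}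
--     return model_mappings
-- ===== SOURCE B (Python) =====
-- def model_mapping(modelnames):
--     prefixes = [e[:-2] if e.endswith("_p") else e for e in modelnames]
--
--     def letter(p):
--         # letter index = number of distinct prefixes occurring strictly before
--         # the first occurrence of p
--         return chr(ord("A") + len(set(prefixes[:prefixes.index(p)])))
--
--     return {e: e.replace(p, letter(p)).replace("_p", r"$_p$")
--             for e, p in zip(modelnames, prefixes)}
-- ===== Notes on version B (the rewrite author's own statement) =====
-- stated objective: alternative
-- what changed: B keeps no running letter-assignment state at all: it derives each name's letter by a standalone counting formula (number of distinct prefixes strictly before the prefix's first occurrence, via set/index on the prefix list) and builds the result in one dict comprehension over zip(modelnames, prefixes), instead of A's incremental ordered list of first-seen prefixes plus enumerate and two staged replace comprehensions.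
import Mathlib
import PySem

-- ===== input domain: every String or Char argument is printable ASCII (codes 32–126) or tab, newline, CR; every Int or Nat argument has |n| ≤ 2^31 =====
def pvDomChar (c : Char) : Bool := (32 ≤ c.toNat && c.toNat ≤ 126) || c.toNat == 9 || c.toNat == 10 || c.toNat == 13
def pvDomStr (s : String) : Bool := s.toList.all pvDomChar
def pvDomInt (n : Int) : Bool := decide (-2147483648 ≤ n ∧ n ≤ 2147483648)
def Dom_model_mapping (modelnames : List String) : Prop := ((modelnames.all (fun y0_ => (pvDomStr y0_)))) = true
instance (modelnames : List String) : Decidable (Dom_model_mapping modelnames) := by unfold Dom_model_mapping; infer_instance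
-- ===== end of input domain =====

-- B replaces A's incremental letter assignment (ordered first-seen prefix list + enumerate +
-- two staged replace comprehensions) by a stateless per-element counting formula: each letter is
-- chr(ord('A') + number of distinct prefixes strictly before the prefix's first occurrence).

-- chr(ord("A") + i) = chr(65 + i); exact for the code points these programs produce
def pvChr (n : Nat) : String := String.ofList [Char.ofNat n]

-- e[:-2] if e.endswith("_p") else e  (shared helper of both ports)
def pvPrefix (e : String) : String :=
  if PySem.Str.endswith e "_p" then PySem.Str.slice e none (some (-2)) else e

-- ===== PORT A =====
-- A's loop body: compute the prefix, extend the ordered list of new prefixes, record e → prefix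
def pvStepA (st : List String × PySem.Dict String String) (e : String) :
    List String × PySem.Dict String String :=
  let mp := pvPrefix e
  (if mp ∈ st.1 then st.1 else st.1 ++ [mp], st.2.insert e mp)

def model_mapping (modelnames : List String) : List (String × String) :=
  let st := modelnames.foldl pvStepA ([], PySem.Dict.empty)
  let models := st.1
  let model_prefixes := st.2
  let mappings : PySem.Dict String String :=
    (PySem.List.enumerate models 0).foldl
      (fun d p => d.insert p.2 (pvChr (65 + p.1.toNat))) PySem.Dict.empty
  -- mappings[v]: the key is always present (every stored prefix was appended to models), so the default is never read
  let mm1 : PySem.Dict String String :=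
    model_prefixes.items.foldl
      (fun d p => d.insert p.1 (PySem.Str.replace p.1 p.2 (mappings.getD p.2 ""))) PySem.Dict.empty
  let mm2 : PySem.Dict String String :=
    mm1.items.foldl
      (fun d p => d.insert p.1 (PySem.Str.replace p.2 "_p" "$_p$")) PySem.Dict.empty
  mm2.items

-- ===== PORT B =====
-- letter(p) = chr(ord("A") + len(set(prefixes[:prefixes.index(p)]))).
-- B only calls it with p ∈ prefixes (p is the prefix of a listed name), so Python's
-- prefixes.index(p) never raises and equals idxOf; prefixes[:i] with 0 ≤ i is List.take.
def pvLetterB (prefixes : List String) (p : String) : String :=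
  pvChr (65 + (PySem.Set.ofList (prefixes.take (prefixes.idxOf p))).length)

def model_mapping_alt (modelnames : List String) : List (String × String) :=
  let prefixes := modelnames.map pvPrefix
  ((modelnames.zip prefixes).foldl
    (fun d ep =>
      d.insert ep.1
        (PySem.Str.replace (PySem.Str.replace ep.1 ep.2 (pvLetterB prefixes ep.2)) "_p" "$_p$"))
    PySem.Dict.empty).items

-- ===== PRECONDITION & SPEC =====
def Spec_model_mapping (modelnames : List String) (out : List (String × String)) : Prop := out = model_mapping_alt modelnames
instance (modelnames : List String) (out : List (String × String)) : Decidable (Spec_model_mapping modelnames out) := by unfold Spec_model_mapping; infer_instance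

-- ===== CLAIM =====
def Claim_equal_model_mapping : Prop := ∀ (modelnames : List String), Dom_model_mapping modelnames → Spec_model_mapping modelnames (model_mapping modelnames)

-- ===== LEMMAS AND PROOFS =====

-- letter assigned to prefix v given the ordered list of distinct prefixes
def pvLetter (models : List String) (v : String) : String := pvChr (65 + models.idxOf v)

-- final label for name k with prefix v
def pvLab (models : List String) (k v : String) : String :=
  PySem.Str.replace (PySem.Str.replace k v (pvLetter models v)) "_p" "$_p$"

-- the items of the prefix→letter dict determined by the ordered prefix list
def pvLDict (models : List String) : List (String × String) :=
  (PySem.List.enumerate models 0).map (fun p => (p.2, pvChr (65 + p.1.toNat)))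

theorem pvLDict_keys (models : List String) :
    (pvLDict models).map (·.1) = models := by
  simp [pvLDict, List.map_map, Function.comp_def, PySem.List.map_snd_enumerate]

theorem mem_pvLDict (models : List String) (v : String) (hv : v ∈ models) :
    (v, pvChr (65 + models.idxOf v)) ∈ pvLDict models := by
  have hlt : models.idxOf v < models.length := List.idxOf_lt_length_of_mem hv
  have hmem : ((0 : Int) + (models.idxOf v : Int), models[models.idxOf v]) ∈ PySem.List.enumerate models 0 :=
    (PySem.List.mem_enumerate_iff models 0 _).mpr ⟨models.idxOf v, hlt, rfl⟩
  have := List.mem_map_of_mem (f := fun p : Int × String => (p.2, pvChr (65 + p.1.toNat))) hmem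
  simpa [pvLDict, List.getElem_idxOf] using this

theorem getD_pvLDict (d : PySem.Dict String String) (models : List String)
    (hd : d.items = pvLDict models) (h1 : models.Nodup) (v : String) (hv : v ∈ models) :
    d.getD v "" = pvChr (65 + models.idxOf v) := by
  have hk : d.keys.Nodup := by
    show (d.items.map (·.1)).Nodup
    rw [hd, pvLDict_keys]; exact h1
  exact PySem.Dict.getD_of_mem_items d (by rw [hd]; exact mem_pvLDict models v hv) hk ""

-- a fold of Set.add only appends to the accumulator
theorem foldl_add_prefix (q : List String) (s : List String) :
    ∃ r, q.foldl PySem.Set.add s = s ++ r := by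
  induction q generalizing s with
  | nil => exact ⟨[], by simp⟩
  | cons a t ih =>
    rw [List.foldl_cons, PySem.Set.add_eq_ite]
    by_cases h : a ∈ s
    · simpa [h] using ih s
    · obtain ⟨r, hr⟩ := ih (s ++ [a])
      exact ⟨a :: r, by simp [h, hr]⟩

theorem idxOf_foldl_add (q : List String) (s : List String) (a : String) (ha : a ∉ s) :
    (q.foldl PySem.Set.add (s ++ [a])).idxOf a = s.length := by
  obtain ⟨r, hr⟩ := foldl_add_prefix q (s ++ [a])
  rw [hr, List.append_assoc, List.idxOf_append_of_notMem ha]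
  simp

-- KEY LEMMA: the position of p in the dedup-in-order of q equals the number of distinct
-- elements strictly before p's first occurrence in q
theorem idxOf_dedup_eq_count (q : List String) (s : List String) (p : String)
    (hq : p ∈ q) (hs : p ∉ s) :
    (q.foldl PySem.Set.add s).idxOf p = ((q.take (q.idxOf p)).foldl PySem.Set.add s).length := by
  induction q generalizing s with
  | nil => cases hq
  | cons a t ih =>
    by_cases h : p = a
    · subst h
      rw [List.idxOf_cons_self]
      simp only [List.take_zero, List.foldl_nil, List.foldl_cons]
      rw [PySem.Set.add_eq_ite, if_neg hs]
      exact idxOf_foldl_add t s p hs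
    · have hpt : p ∈ t := by
        rcases List.mem_cons.mp hq with h' | h'
        · exact absurd h' h
        · exact h'
      have hps : p ∉ PySem.Set.add s a := by
        intro hmem
        rcases (PySem.Set.mem_add s a p).mp hmem with h' | h'
        · exact hs h'
        · exact h h'
      rw [List.idxOf_cons_ne _ (by simpa using fun h' => h h'.symm)]
      simp only [List.take_succ_cons, List.foldl_cons]
      exact ih (PySem.Set.add s a) hpt hps

-- fold of inserts whose value is a function of the key: items are the dedup of the keys, mapped
theorem items_foldl_insert_key (l : List String) (d : PySem.Dict String String)
    (f : String → String) (seen : List String)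
    (h : d.items = seen.map (fun k => (k, f k))) :
    (l.foldl (fun d e => d.insert e (f e)) d).items
      = (l.foldl PySem.Set.add seen).map (fun k => (k, f k)) := by
  induction l generalizing d seen with
  | nil => simp only [List.foldl_nil]; exact h
  | cons e t ih =>
    simp only [List.foldl_cons]
    have hkeys : d.keys = seen := by
      show d.items.map (·.1) = seen
      rw [h, List.map_map]; simp [Function.comp_def]
    have hc : d.contains e = decide (e ∈ seen) := by
      rw [PySem.Dict.contains_eq_decide_mem_keys, hkeys]
    rw [PySem.Set.add_eq_ite]
    by_cases he : e ∈ seen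
    · have hd' : (d.insert e (f e)).items = seen.map (fun k => (k, f k)) := by
        rw [PySem.Dict.items_insert, hc]
        simp only [he, decide_true, if_true, h, List.map_map]
        apply List.map_congr_left
        intro k _
        by_cases hk : k = e <;> simp [hk]
      rw [if_pos he]
      exact ih (d.insert e (f e)) seen hd'
    · have hd' : (d.insert e (f e)).items = (seen ++ [e]).map (fun k => (k, f k)) := by
        rw [PySem.Dict.items_insert, hc]
        simp [he, h]
      rw [if_neg he]
      exact ih (d.insert e (f e)) (seen ++ [e]) hd'

-- A's fold splits into two independent folds
theorem foldA_fst (l : List String) (acc : List String × PySem.Dict String String) :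
    (l.foldl pvStepA acc).1 = l.foldl (fun s e => PySem.Set.add s (pvPrefix e)) acc.1 := by
  induction l generalizing acc with
  | nil => rfl
  | cons e t ih =>
    simp only [List.foldl_cons]
    rw [ih]
    congr 1
    simp [pvStepA, PySem.Set.add_eq_ite]

theorem foldA_snd (l : List String) (acc : List String × PySem.Dict String String) :
    (l.foldl pvStepA acc).2 = l.foldl (fun d e => d.insert e (pvPrefix e)) acc.2 := by
  induction l generalizing acc with
  | nil => rfl
  | cons e t ih =>
    simp only [List.foldl_cons]
    rw [ih]
    rfl

-- ===== VERDICT =====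
theorem model_mapping_spec : Claim_equal_model_mapping := by
  intro modelnames _
  show model_mapping modelnames = model_mapping_alt modelnames
  have hempty : (PySem.Dict.empty : PySem.Dict String String).items = [] := rfl
  -- shared names
  set prefixes := modelnames.map pvPrefix with hprefdef
  have hfoldpre : modelnames.foldl (fun s e => PySem.Set.add s (pvPrefix e)) [] =
      PySem.Set.ofList prefixes := by
    rw [PySem.Set.ofList_eq_foldl, hprefdef, List.foldl_map]
  -- ==== reduce A ====
  have hmodels : (modelnames.foldl pvStepA ([], PySem.Dict.empty)).1 = PySem.Set.ofList prefixes := by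
    rw [foldA_fst]; exact hfoldpre
  have hmp : (modelnames.foldl pvStepA ([], PySem.Dict.empty)).2.items
      = (PySem.Set.ofList modelnames).map (fun k => (k, pvPrefix k)) := by
    rw [foldA_snd]
    rw [items_foldl_insert_key modelnames PySem.Dict.empty pvPrefix [] (by simp [hempty])]
    rw [PySem.Set.ofList_eq_foldl]
  set models := (modelnames.foldl pvStepA ([], PySem.Dict.empty)).1 with hmodelsdef
  set mp := (modelnames.foldl pvStepA ([], PySem.Dict.empty)).2 with hmpdef
  have h1 : models.Nodup := by rw [hmodels]; exact PySem.Set.nodup_ofList prefixes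
  have h2 : (mp.items.map (fun p : String × String => p.1)).Nodup := by
    rw [hmp, List.map_map]
    simp only [Function.comp_def, List.map_id']
    exact PySem.Set.nodup_ofList modelnames
  have h4 : ∀ p ∈ mp.items, p.2 ∈ models := by
    intro p hp
    rw [hmp] at hp
    obtain ⟨k, hk, rfl⟩ := List.mem_map.mp hp
    have : k ∈ modelnames := (PySem.Set.mem_ofList _ _).mp hk
    rw [hmodels]
    exact (PySem.Set.mem_ofList _ _).mpr (List.mem_map_of_mem this)
  unfold model_mapping model_mapping_alt
  simp only
  rw [← hmodelsdef, ← hmpdef, ← hprefdef]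
  -- the enumerate pass builds exactly the letter dict items
  have hmapkeys : ((PySem.List.enumerate models 0).map (fun p : Int × String => p.2)).Nodup := by
    rw [PySem.List.map_snd_enumerate]; exact h1
  have hmappings : ((PySem.List.enumerate models 0).foldl
      (fun d p => d.insert p.2 (pvChr (65 + p.1.toNat))) PySem.Dict.empty).items = pvLDict models := by
    rw [PySem.Dict.items_foldl_insert_fresh _ _ _ _ (by intro a _; rfl) hmapkeys]
    simp [pvLDict, hempty]
  set mappings := (PySem.List.enumerate models 0).foldl
      (fun d p => d.insert p.2 (pvChr (65 + p.1.toNat))) PySem.Dict.empty with hmdef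
  have hmm1 : (mp.items.foldl
      (fun d p => d.insert p.1 (PySem.Str.replace p.1 p.2 (mappings.getD p.2 ""))) PySem.Dict.empty).items
      = mp.items.map (fun p => (p.1, PySem.Str.replace p.1 p.2 (mappings.getD p.2 ""))) := by
    rw [PySem.Dict.items_foldl_insert_fresh _ _ _ _ (by intro a _; rfl) h2]
    simp [hempty]
  set mm1 := mp.items.foldl
      (fun d p => d.insert p.1 (PySem.Str.replace p.1 p.2 (mappings.getD p.2 ""))) PySem.Dict.empty with hmm1def
  have hmm2keys : (mm1.items.map (fun p : String × String => p.1)).Nodup := by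
    rw [hmm1, List.map_map]
    simpa [Function.comp_def] using h2
  have hmm2 : (mm1.items.foldl
      (fun d p => d.insert p.1 (PySem.Str.replace p.2 "_p" "$_p$")) PySem.Dict.empty).items
      = mm1.items.map (fun p => (p.1, PySem.Str.replace p.2 "_p" "$_p$")) := by
    rw [PySem.Dict.items_foldl_insert_fresh _ _ _ _ (by intro a _; rfl) hmm2keys]
    simp [hempty]
  rw [hmm2, hmm1, List.map_map, hmp, List.map_map]
  -- ==== reduce B ====
  have hzip : modelnames.zip prefixes = modelnames.map (fun e => (e, pvPrefix e)) := by
    rw [hprefdef]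
    simpa using (List.zip_map' (f := id) (g := pvPrefix) (l := modelnames))
  rw [hzip, List.foldl_map]
  rw [items_foldl_insert_key modelnames PySem.Dict.empty
    (fun e => PySem.Str.replace (PySem.Str.replace e (pvPrefix e) (pvLetterB prefixes (pvPrefix e))) "_p" "$_p$")
    [] (by simp [hempty])]
  rw [PySem.Set.ofList_eq_foldl]
  -- ==== pointwise: the two labels agree ====
  apply List.map_congr_left
  intro k hk
  have hkmem : k ∈ modelnames := by
    rw [← PySem.Set.ofList_eq_foldl] at hk
    exact (PySem.Set.mem_ofList _ _).mp hk
  have hpmem : pvPrefix k ∈ prefixes := by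
    rw [hprefdef]; exact List.mem_map_of_mem hkmem
  have hvmem : pvPrefix k ∈ models := by
    rw [hmodels]; exact (PySem.Set.mem_ofList _ _).mpr hpmem
  have hgd := getD_pvLDict mappings models hmappings h1 (pvPrefix k) hvmem
  have hcount : models.idxOf (pvPrefix k)
      = (PySem.Set.ofList (prefixes.take (prefixes.idxOf (pvPrefix k)))).length := by
    rw [hmodels, PySem.Set.ofList_eq_foldl, PySem.Set.ofList_eq_foldl]
    exact idxOf_dedup_eq_count prefixes [] (pvPrefix k) hpmem (by simp)
  simp only [Function.comp_def]
  rw [hgd, hcount]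
  rfl
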